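-- pv_equiv track=rewrite | github.com/AkusChhabra/CPS109 | allproblemx.py | create_zigzag
-- ===== SOURCE A (Python) =====
-- def create_zigzag(rows, cols, start=1):
--   grid, n, = [], start
--
--   for i in range(rows):
--     grid.append(list(range(n, n + cols)))
--     n = n + cols
--
--   for i in range (1, rows, 2):
--     grid[i].reverse()
--
--   return grid
-- ===== SOURCE B (Python) =====
-- def create_zigzag(rows, cols, start=1):
--   grid = []
--   for i in range(rows):
--     n = start + i * cols
--     if i % 2 == 0:
--       grid.append(list(range(n, n + cols)))
--     else:
--       grid.append(list(range(n + cols - 1, n - 1, -1)))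
--   return grid
-- ===== Notes on version B (the rewrite author's own statement) =====
-- stated objective: alternative
-- what changed: Single pass computing each row's start as start+i*cols and emitting it directly in its final direction (descending range for odd rows), replacing A's two-pass build-then-reverse with its running counter and in-place reversal loop.
import Mathlib
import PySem

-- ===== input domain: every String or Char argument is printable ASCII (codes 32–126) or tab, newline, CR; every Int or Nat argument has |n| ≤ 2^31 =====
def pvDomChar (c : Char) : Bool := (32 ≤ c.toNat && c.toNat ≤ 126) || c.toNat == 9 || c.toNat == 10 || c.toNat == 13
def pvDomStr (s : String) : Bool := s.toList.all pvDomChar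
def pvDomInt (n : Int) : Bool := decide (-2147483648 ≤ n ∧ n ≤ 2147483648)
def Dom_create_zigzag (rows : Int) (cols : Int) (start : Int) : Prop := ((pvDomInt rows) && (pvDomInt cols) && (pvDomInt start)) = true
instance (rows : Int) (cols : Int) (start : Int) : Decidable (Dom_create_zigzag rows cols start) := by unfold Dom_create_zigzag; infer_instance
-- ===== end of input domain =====

-- B builds each zigzag row directly in its final direction in one pass (alternative decomposition; return value only).


-- ===== PORT A =====
-- for i in range(rows): grid.append(list(range(n, n+cols))); n += cols
-- then for i in range(1, rows, 2): grid[i].reverse()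
def create_zigzag (rows : Int) (cols : Int) (start : Int) : List (List Int) :=
  (PySem.List.pyRange 1 rows 2).foldl
    (fun g i => g.set i.toNat ((g.getD i.toNat []).reverse))
    ((PySem.List.pyRange 0 rows 1).foldl
      (fun (st : List (List Int) × Int) (_ : Int) =>
        (st.1 ++ [PySem.List.pyRange st.2 (st.2 + cols) 1], st.2 + cols))
      ([], start)).1

-- ===== PORT B =====
def create_zigzag_alt (rows : Int) (cols : Int) (start : Int) : List (List Int) :=
  (PySem.List.pyRange 0 rows 1).map (fun i =>
    if PySem.Int.mod i 2 == 0 then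
      PySem.List.pyRange (start + i * cols) (start + i * cols + cols) 1
    else
      PySem.List.pyRange (start + i * cols + cols - 1) (start + i * cols - 1) (-1))

-- ===== PRECONDITION & SPEC =====
def Spec_create_zigzag (rows : Int) (cols : Int) (start : Int) (out : List (List Int)) : Prop := out = create_zigzag_alt rows cols start
instance (rows : Int) (cols : Int) (start : Int) (out : List (List Int)) : Decidable (Spec_create_zigzag rows cols start out) := by unfold Spec_create_zigzag; infer_instance

-- ===== CLAIM (what is proved, stated in full; the proofs are below) =====
def Claim_equal_create_zigzag : Prop := ∀ (rows : Int) (cols : Int) (start : Int), Dom_create_zigzag rows cols start → Spec_create_zigzag rows cols start (create_zigzag rows cols start)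

-- ===== LEMMAS AND PROOFS =====

-- A's first loop: the counter n is advanced by cols per iteration, so row j starts at n + j*cols.
theorem zz_fold1 (cols : Int) : ∀ (l : List Int) (g : List (List Int)) (n : Int),
    l.foldl (fun (st : List (List Int) × Int) (_ : Int) =>
      (st.1 ++ [PySem.List.pyRange st.2 (st.2 + cols) 1], st.2 + cols)) (g, n)
    = (g ++ (List.range l.length).map
        (fun (j : Nat) => PySem.List.pyRange (n + (j : Int) * cols) (n + (j : Int) * cols + cols) 1),
       n + l.length * cols) := by
  intro l
  induction l with
  | nil => intro g n; simp
  | cons x xs ih =>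
    intro g n
    simp only [List.foldl_cons, ih, List.length_cons, List.range_succ_eq_map,
      List.map_cons, List.map_map]
    simp only [Prod.mk.injEq]
    refine ⟨?_, ?_⟩
    · rw [List.append_assoc, List.singleton_append]
      congr 1
      push_cast
      ring_nf
      congr 1
      apply List.map_congr_left
      intro k _
      simp only [Function.comp_apply]
      push_cast
      ring_nf
    · push_cast; ring

-- A's second loop: a fold of in-place reversals at pairwise-distinct indices,
-- described pointwise by getElem?.
theorem zz_revfold : ∀ (ns : List Int), (ns.map Int.toNat).Nodup → ∀ (g : List (List Int)) (j : Nat),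
    (ns.foldl (fun g i => g.set i.toNat ((g.getD i.toNat []).reverse)) g)[j]?
    = if j ∈ ns.map Int.toNat then (g[j]?).map List.reverse else g[j]? := by
  intro ns
  induction ns with
  | nil => intro _ g j; simp
  | cons i ns ih =>
    intro hnd g j
    have hnd' := hnd
    rw [List.map_cons, List.nodup_cons] at hnd'
    simp only [List.foldl_cons, List.map_cons]
    rw [ih hnd'.2]
    by_cases hjns : j ∈ ns.map Int.toNat
    · have hji : j ≠ i.toNat := fun h => hnd'.1 (h ▸ hjns)
      simp [hjns, hji, List.getElem?_set_ne (fun h => hji h.symm)]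
    · by_cases hji : j = i.toNat
      · subst hji
        simp only [hjns, if_false, List.mem_cons, true_or, if_true]
        by_cases hlt : i.toNat < g.length
        · rw [List.getElem?_set_self hlt]
          simp [List.getD, List.getElem?_eq_getElem hlt]
        · rw [List.getElem?_eq_none (by simp; omega),
              List.getElem?_eq_none (by omega)]
          rfl
      · simp [hjns, hji, List.getElem?_set_ne (fun h => hji h.symm)]

-- The indices of A's second loop, as Nats: exactly the odd j with j < rows.
theorem zz_mem_ns (rows : Int) (j : Nat) :
    j ∈ (PySem.List.pyRange 1 rows 2).map Int.toNat ↔ j % 2 = 1 ∧ (j : Int) < rows := by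
  simp only [List.mem_map]
  constructor
  · rintro ⟨x, hx, rfl⟩
    rw [PySem.List.mem_pyRange_iff_of_pos (by norm_num)] at hx
    obtain ⟨h1, h2, k, hk⟩ := hx
    omega
  · rintro ⟨hodd, hlt⟩
    refine ⟨(j : Int), ?_, by simp⟩
    rw [PySem.List.mem_pyRange_iff_of_pos (by norm_num)]
    refine ⟨by omega, hlt, ⟨(j : Int) / 2, by omega⟩⟩
  
theorem zz_nodup_ns (rows : Int) : ((PySem.List.pyRange 1 rows 2).map Int.toNat).Nodup := by
  rw [PySem.List.pyRange_of_pos _ _ (by norm_num), List.map_map]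
  refine (List.nodup_range).map ?_
  intro a b h
  simp only [Function.comp_apply] at h
  omega

-- ===== VERDICT (by name: the statement is the Claim_ definition above) =====
theorem create_zigzag_spec : Claim_equal_create_zigzag := by
  intro rows cols start _
  unfold Spec_create_zigzag create_zigzag create_zigzag_alt
  rw [zz_fold1]
  apply List.ext_getElem?
  intro j
  rw [zz_revfold _ (zz_nodup_ns rows)]
  have hlen : (PySem.List.pyRange 0 rows 1).length = rows.toNat := by
    simp [PySem.List.length_pyRange_one]
  rw [hlen]
  simp only [List.nil_append, List.getElem?_map, PySem.List.getElem?_pyRange_one, zero_add]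
  by_cases hj : j < rows.toNat
  · rw [List.getElem?_range hj]
    simp only [Option.map_some]
    have hjr : j < (rows - 0).toNat := by omega
    simp only [hjr, if_true]
    by_cases hodd : j % 2 = 1
    · rw [if_pos ((zz_mem_ns rows j).mpr ⟨hodd, by omega⟩)]
      have hm : ¬ (PySem.Int.mod (j : Int) 2 == 0) = true := by
        rw [PySem.Int.mod_eq_emod_of_pos (by norm_num)]
        simp only [beq_iff_eq]
        omega
      simp only [Option.map_some, hm]
      rw [PySem.List.pyRange_neg_one_eq_reverse]
      simp
    · rw [if_neg (fun h => hodd ((zz_mem_ns rows j).mp h).1)]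
      have hm : (PySem.Int.mod (j : Int) 2 == 0) = true := by
        rw [PySem.Int.mod_eq_emod_of_pos (by norm_num)]
        simp only [beq_iff_eq]
        omega
      simp only [Option.map_some, hm, if_true]
  · have hnm : ¬ j ∈ (PySem.List.pyRange 1 rows 2).map Int.toNat := by
      intro h
      have := ((zz_mem_ns rows j).mp h).2
      omega
    rw [if_neg hnm, List.getElem?_eq_none (by rw [List.length_range]; omega)]
    rw [if_neg (show ¬ j < (rows - 0).toNat by omega)]
    rfl
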